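-- pv_equiv track=rewrite | github.com/noishi-bot/noishi | noishi/at.py | at_command_expect
-- ===== SOURCE A (Python) =====
-- def at_command_expect(text: str, expected: str) -> list[str]:
--     result = []
--     lines = text.splitlines()
--     for line in lines:
--         line = line.strip()
--         if not line:
--             continue
--         if line == "OK":
--             break
--         if line == "ERROR":
--             raise RuntimeError("AT command error")
--         if expected and line.startswith(expected):
--             result.append(line[len(expected):].lstrip())
--     return result
-- ===== SOURCE B (Python) =====
-- def at_command_expect(text: str, expected: str) -> list[str]:
--     # Two-stage: cut the stripped lines at the first "OK" terminator, then parse that prefix.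
--     stripped = [ln.strip() for ln in text.splitlines()]
--     pre = stripped[:stripped.index("OK")] if "OK" in stripped else stripped
--     if "ERROR" in pre:
--         raise RuntimeError("AT command error")
--     if not expected:
--         return []
--     return [ln[len(expected):].lstrip() for ln in pre if ln.startswith(expected)]
-- ===== Notes on version B (the rewrite author's own statement) =====
-- stated objective: alternative
-- what changed: Replaces the single inline-break loop with a two-stage decomposition: cut the stripped lines at the first 'OK' terminator (index + slice), then check for 'ERROR' and parse the prefix with a filter/map comprehension.
import Mathlib
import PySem

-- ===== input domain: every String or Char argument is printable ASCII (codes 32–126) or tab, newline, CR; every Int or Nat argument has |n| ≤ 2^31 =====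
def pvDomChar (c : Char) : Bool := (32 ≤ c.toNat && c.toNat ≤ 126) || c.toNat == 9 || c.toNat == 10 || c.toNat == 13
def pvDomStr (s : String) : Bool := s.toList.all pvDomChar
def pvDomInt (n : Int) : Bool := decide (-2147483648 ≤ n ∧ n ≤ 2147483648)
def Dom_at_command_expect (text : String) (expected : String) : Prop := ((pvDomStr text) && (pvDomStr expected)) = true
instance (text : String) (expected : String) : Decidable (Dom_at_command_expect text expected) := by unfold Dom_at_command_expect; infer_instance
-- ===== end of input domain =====

-- B re-decomposes A's inline-break loop as: cut the stripped lines at the first "OK", then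
-- check for "ERROR" and parse the prefix with a filter/map pass (alternative decomposition, same cost).

-- ===== PORT A =====
-- A's for-loop with continue/break/raise, as structural recursion over the remaining lines
-- with the accumulated result. On the "ERROR" branch Python raises RuntimeError (excluded by Pre_);
-- the port returns the accumulator there (never relied on inside Pre_).
def atLoopA (expected : String) (acc : List String) : List String → List String
  | [] => acc
  | l :: ls =>
    let line := PySem.Str.strip l
    if line = "" then atLoopA expected acc ls
    else if line = "OK" then acc
    else if line = "ERROR" then acc
    else if expected ≠ "" ∧ PySem.Str.startswith line expected = true then
      atLoopA expected
        (acc ++ [PySem.Str.lstrip (PySem.Str.slice line (some (PySem.Str.len expected)) none)]) ls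
    else atLoopA expected acc ls

def at_command_expect (text : String) (expected : String) : List String :=
  atLoopA expected [] (PySem.Str.splitlines text)

-- ===== PORT B =====
def at_command_expect_alt (text : String) (expected : String) : List String :=
  let stripped := (PySem.Str.splitlines text).map PySem.Str.strip
  -- pre = stripped[:stripped.index("OK")] if "OK" in stripped else stripped
  let pre := match PySem.List.index? stripped "OK" with
    | some i => stripped.take i
    | none => stripped
  if "ERROR" ∈ pre then []   -- Python raises RuntimeError here (excluded by Pre_)
  else if expected = "" then []
  else (pre.filter (fun ln => PySem.Str.startswith ln expected)).map
    (fun ln => PySem.Str.lstrip (PySem.Str.slice ln (some (PySem.Str.len expected)) none))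

-- ===== PRECONDITION & SPEC =====
-- Pre_ excludes exactly the inputs on which A raises RuntimeError("AT command error"):
-- those whose stripped lines before the first "OK" line contain a line equal to "ERROR"
-- (B raises the same exception there).
def Pre_at_command_expect (text : String) (expected : String) : Prop :=
  "ERROR" ∉ ((PySem.Str.splitlines text).map PySem.Str.strip).takeWhile (fun l => l ≠ "OK")
instance (text : String) (expected : String) : Decidable (Pre_at_command_expect text expected) := by
  unfold Pre_at_command_expect; infer_instance

def pvWitness_at_command_expect : String × String := ("AT+CSQ: 5,99\nOK\nERROR", "AT+CSQ:")

def Spec_at_command_expect (text : String) (expected : String) (out : List String) : Prop :=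
  out = at_command_expect_alt text expected
instance (text : String) (expected : String) (out : List String) :
    Decidable (Spec_at_command_expect text expected out) := by
  unfold Spec_at_command_expect; infer_instance

-- ===== CLAIM (what is proved, stated in full; the proofs are below) =====
def Claim_equal_at_command_expect : Prop :=
  ∀ (text : String) (expected : String), Dom_at_command_expect text expected →
    Pre_at_command_expect text expected →
    Spec_at_command_expect text expected (at_command_expect text expected)

-- ===== LEMMAS AND PROOFS =====

-- cutting at the index of the first "OK" is takeWhile (· ≠ "OK")
theorem take_index_eq_takeWhile (s : List String) :
    (match PySem.List.index? s "OK" with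
      | some i => s.take i
      | none => s) = s.takeWhile (fun l => l ≠ "OK") := by
  induction s with
  | nil => simp [PySem.List.index?]
  | cons x xs ih =>
    by_cases hx : x = "OK"
    · subst hx
      rw [PySem.List.index?_cons_self]
      simp
    · rw [PySem.List.index?_cons_of_ne xs hx]
      simp only [List.takeWhile_cons]
      rw [if_pos (by simpa using hx)]
      cases h : PySem.List.index? xs "OK" with
      | none => rw [h] at ih; simp at ih; simp [← ih]
      | some i => rw [h] at ih; simp at ih; simp [List.take_succ_cons, ← ih]

-- when expected = "", A's loop never appends
theorem atLoopA_empty_expected (acc : List String) (ls : List String) :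
    atLoopA "" acc ls = acc := by
  induction ls generalizing acc with
  | nil => rfl
  | cons l ls ih =>
    simp only [atLoopA]
    split_ifs with h1 h2 h3 h4
    · exact ih acc
    · rfl
    · rfl
    · exact absurd h4.1 (by simp)
    · exact ih acc

-- a nonempty pattern is not a prefix of the empty line
theorem startswith_nil_false (cs : List Char) (h : cs ≠ []) :
    PySem.Chars.startswith [] cs = false := by
  rcases hb : PySem.Chars.startswith [] cs with _ | _
  · rfl
  · exact absurd (List.prefix_nil.mp ((PySem.Chars.startswith_iff [] cs).mp hb)) h

-- main loop invariant: A's loop on ls equals acc ++ B's filter/map pass over the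
-- pre-"OK" prefix of the stripped lines, when that prefix has no "ERROR"
theorem atLoopA_eq (expected : String) (he : expected ≠ "") (ls : List String) (acc : List String)
    (h : "ERROR" ∉ (ls.map PySem.Str.strip).takeWhile (fun l => l ≠ "OK")) :
    atLoopA expected acc ls =
      acc ++ (((ls.map PySem.Str.strip).takeWhile (fun l => l ≠ "OK")).filter
          (fun ln => PySem.Str.startswith ln expected)).map
        (fun ln => PySem.Str.lstrip (PySem.Str.slice ln (some (PySem.Str.len expected)) none)) := by
  induction ls generalizing acc with
  | nil => simp [atLoopA]
  | cons l ls ih =>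
    simp only [List.map_cons, List.takeWhile_cons] at h ⊢
    by_cases hok : PySem.Str.strip l = "OK"
    · simp only [atLoopA]
      rw [if_neg (by simp [hok]), if_pos hok]
      simp [hok]
    · rw [if_pos (by simpa using hok)] at h ⊢
      simp only [List.mem_cons, not_or] at h
      obtain ⟨herr, htail⟩ := h
      by_cases hz : PySem.Str.strip l = ""
      · simp only [atLoopA]
        rw [if_pos hz, hz]
        rw [List.filter_cons_of_neg (by
          simp only [PySem.Str.startswith_eq]
          simp [startswith_nil_false expected.toList (by simp [he])])]
        exact ih acc htail
      · simp only [atLoopA]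
        rw [if_neg hz, if_neg hok, if_neg (fun c => herr c.symm)]
        by_cases hsw : PySem.Str.startswith (PySem.Str.strip l) expected = true
        · rw [if_pos ⟨he, hsw⟩]
          rw [List.filter_cons_of_pos (by simpa using hsw)]
          rw [ih _ htail]
          simp
        · rw [if_neg (fun c => hsw c.2)]
          rw [List.filter_cons_of_neg (by simpa using hsw)]
          exact ih acc htail

-- ===== VERDICT (by name: the statement is the Claim_ definition above) =====
theorem at_command_expect_spec : Claim_equal_at_command_expect := by
  intro text expected _ hpre
  unfold Spec_at_command_expect at_command_expect at_command_expect_alt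
  simp only [take_index_eq_takeWhile]
  unfold Pre_at_command_expect at hpre
  rw [if_neg hpre]
  by_cases he : expected = ""
  · subst he
    rw [if_pos rfl]
    exact atLoopA_empty_expected [] _
  · rw [if_neg he]
    simpa using atLoopA_eq expected he (PySem.Str.splitlines text) [] hpre
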